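-- pv_equiv track=rewrite | github.com/Artenos-tech/cli-chat-gpt | streamchat.py | truncate_message_history
-- ===== SOURCE A (Python) =====
-- from typing import Generator, TypedDict
--
-- class Message(TypedDict):
--     role: str
--     content: str
--
-- def truncate_message_history(message_history: list[Message], char_limit: int = 1000) -> list[Message]:
--     """
--     Truncate the message history so that the total number of characters
--     in all the messages don't cross `char_limit`.
--     Messages should be removed from the start of the list, and only entire messages can be removed.
--     """
--     new_list: list[Message] = []
--     total_chars = 0
--     for message in reversed(message_history):
--         total_chars += len(message['content'])
--         if total_chars > char_limit:
--             break
--         new_list.append(message)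
--     return list(reversed(new_list))
-- ===== SOURCE B (Python) =====
-- def truncate_message_history(message_history, char_limit=1000):
--     # Prefix sums of content lengths: prefix[i] = chars in the first i messages.
--     prefix = [0]
--     for m in message_history:
--         prefix.append(prefix[-1] + len(m['content']))
--     total = prefix[-1]
--     # Keep the suffix starting at the first index i whose dropped prefix is big
--     # enough, i.e. total - prefix[i] <= char_limit.
--     for i in range(len(prefix)):
--         if prefix[i] >= total - char_limit:
--             return message_history[i:]
--     return []
-- ===== Notes on version B (the rewrite author's own statement) =====
-- stated objective: alternative
-- what changed: Instead of A's backward iteration accumulating messages into a new list with an early break and a final re-reversal, B builds the prefix-sum array of content lengths in one forward pass and then returns the slice starting at the first index whose dropped-prefix length brings the remaining total within the limit.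
-- outside the precondition, e.g. on truncate_message_history([{'z': 'z'}, {'content': 'long text'}], 4): A returns [], B raises KeyError
import Mathlib
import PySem

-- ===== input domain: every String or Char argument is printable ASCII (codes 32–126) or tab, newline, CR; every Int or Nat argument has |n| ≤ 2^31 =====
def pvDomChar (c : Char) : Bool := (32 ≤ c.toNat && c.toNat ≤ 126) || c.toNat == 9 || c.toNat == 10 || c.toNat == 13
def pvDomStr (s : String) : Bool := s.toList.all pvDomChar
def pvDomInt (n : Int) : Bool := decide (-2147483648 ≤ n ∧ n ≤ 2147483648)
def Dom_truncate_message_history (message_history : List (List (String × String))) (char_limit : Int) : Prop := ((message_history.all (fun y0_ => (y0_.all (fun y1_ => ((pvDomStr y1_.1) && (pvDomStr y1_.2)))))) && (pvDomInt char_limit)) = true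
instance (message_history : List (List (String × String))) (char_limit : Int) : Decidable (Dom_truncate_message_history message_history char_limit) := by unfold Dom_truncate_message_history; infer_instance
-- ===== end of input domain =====

-- B replaces A's backward accumulation-with-break and re-reversal by a forward prefix-sum
-- pass followed by a first-index scan and a slice (objective: alternative decomposition).

-- ===== PORT A =====
-- len(message['content']) — dict-lookup primitive (KeyError excluded by Pre_; getD "" is exact there)
def pvContentLen (m : List (String × String)) : Int :=
  PySem.Str.len (((PySem.Dict.mk m).get? "content").getD "")

-- the for-loop over reversed(message_history): state = (total_chars, new_list); break returns new_list
def pvLoopA (char_limit : Int) : List (List (String × String)) → Int → List (List (String × String)) → List (List (String × String))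
  | [], _, new_list => new_list
  | m :: rest, total, new_list =>
    let total' := total + pvContentLen m
    if total' > char_limit then new_list
    else pvLoopA char_limit rest total' (new_list ++ [m])

def truncate_message_history (message_history : List (List (String × String))) (char_limit : Int) : List (List (String × String)) :=
  (pvLoopA char_limit message_history.reverse 0 []).reverse

-- ===== PORT B =====
-- the `for i in range(len(prefix)): if prefix[i] >= total - char_limit: return message_history[i:]`
-- loop: a scan over the prefix list carrying the index i; message_history[i:] with i ≥ 0 is .drop i
def pvScanB (mh : List (List (String × String))) (thr : Int) :
    List Int → Nat → List (List (String × String))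
  | [], _ => []
  | p :: rest, i => if p ≥ thr then mh.drop i else pvScanB mh thr rest (i + 1)

def truncate_message_history_alt (message_history : List (List (String × String))) (char_limit : Int) : List (List (String × String)) :=
  -- prefix = [0]; for m in mh: prefix.append(prefix[-1] + len(m['content']))
  let pref := message_history.foldl
    (fun p m => p ++ [(p.getLast?.getD 0) + pvContentLen m]) [0]
  let total := pref.getLast?.getD 0
  pvScanB message_history (total - char_limit) pref 0

-- ===== PRECONDITION & SPEC =====
-- Pre_ excludes inputs where some message lacks a 'content' key: B (which sums all lengths up front)
-- raises KeyError there, and A either raises too or happens to return because its backward loop breaks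
-- before reaching the malformed message.
def Pre_truncate_message_history (message_history : List (List (String × String))) (char_limit : Int) : Prop :=
  ∀ m ∈ message_history, ((PySem.Dict.mk m).get? "content").isSome = true
instance (message_history : List (List (String × String))) (char_limit : Int) : Decidable (Pre_truncate_message_history message_history char_limit) := by unfold Pre_truncate_message_history; infer_instance

def pvWitness_truncate_message_history : (List (List (String × String))) × Int :=
  ([[("role", "user"), ("content", "hi")], [("role", "assistant"), ("content", "hello!")]], 10)

def Spec_truncate_message_history (message_history : List (List (String × String))) (char_limit : Int) (out : List (List (String × String))) : Prop := out = truncate_message_history_alt message_history char_limit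
instance (message_history : List (List (String × String))) (char_limit : Int) (out : List (List (String × String))) : Decidable (Spec_truncate_message_history message_history char_limit out) := by unfold Spec_truncate_message_history; infer_instance

-- ===== CLAIM (what is proved, stated in full; the proofs are below) =====
def Claim_equal_truncate_message_history : Prop := ∀ (message_history : List (List (String × String))) (char_limit : Int), Dom_truncate_message_history message_history char_limit → Pre_truncate_message_history message_history char_limit → Spec_truncate_message_history message_history char_limit (truncate_message_history message_history char_limit)

-- ===== LEMMAS AND PROOFS =====

-- total content length of a list of messages
def pvSumC (l : List (List (String × String))) : Int := (l.map pvContentLen).sum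

-- "take while the running total stays within the limit" — what A's loop accumulates
def pvT (C : Int) : List (List (String × String)) → Int → List (List (String × String))
  | [], _ => []
  | m :: rest, t => if t + pvContentLen m > C then [] else m :: pvT C rest (t + pvContentLen m)

-- "drop heads while the suffix total exceeds the limit" — the common characterisation
def pvB' (C : Int) : List (List (String × String)) → List (List (String × String))
  | [] => []
  | m :: rest => if pvContentLen m + pvSumC rest > C then pvB' C rest else m :: rest

-- running partial sums after a start value t (the tail of B's prefix list)
def pvScanTail : List (List (String × String)) → Int → List Int
  | [], _ => []
  | m :: rest, t => (t + pvContentLen m) :: pvScanTail rest (t + pvContentLen m)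

theorem pvContentLen_nonneg (m : List (String × String)) : 0 ≤ pvContentLen m := by
  simp [pvContentLen, PySem.Str.len]

theorem pvSumC_nonneg (l : List (List (String × String))) : 0 ≤ pvSumC l := by
  induction l with
  | nil => simp [pvSumC]
  | cons m rest ih =>
    have := pvContentLen_nonneg m
    simp only [pvSumC, List.map_cons, List.sum_cons] at *
    omega

theorem pvSumC_reverse (l : List (List (String × String))) : pvSumC l.reverse = pvSumC l := by
  simp [pvSumC, List.map_reverse]

theorem pvLoopA_eq (C : Int) (l : List (List (String × String))) (t : Int) (acc : List (List (String × String))) :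
    pvLoopA C l t acc = acc ++ pvT C l t := by
  induction l generalizing t acc with
  | nil => simp [pvLoopA, pvT]
  | cons m rest ih =>
    simp only [pvLoopA, pvT]
    split_ifs with h
    · simp
    · rw [ih]; simp

theorem pvT_all (C : Int) (l : List (List (String × String))) (t : Int) (h : t + pvSumC l ≤ C) :
    pvT C l t = l := by
  induction l generalizing t with
  | nil => simp [pvT]
  | cons m rest ih =>
    have h1 : pvContentLen m + pvSumC rest = pvSumC (m :: rest) := by
      simp [pvSumC]
    have h2 := pvSumC_nonneg rest
    simp only [pvT]
    rw [if_neg (by omega), ih _ (by omega)]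

theorem pvT_append_last (C : Int) (xs : List (List (String × String))) (m : List (String × String)) (t : Int)
    (h : C < t + pvSumC xs + pvContentLen m) :
    pvT C (xs ++ [m]) t = pvT C xs t := by
  induction xs generalizing t with
  | nil =>
    simp only [pvSumC, List.map_nil, List.sum_nil] at h
    simp only [List.nil_append, pvT]
    rw [if_pos (by omega)]
  | cons x xs' ih =>
    have hx : pvSumC (x :: xs') = pvContentLen x + pvSumC xs' := by simp [pvSumC]
    simp only [List.cons_append, pvT]
    split_ifs with hb
    · rfl
    · rw [ih _ (by omega)]

theorem pvT_reverse_eq_B' (C : Int) (l : List (List (String × String))) :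
    (pvT C l.reverse 0).reverse = pvB' C l := by
  induction l with
  | nil => simp [pvT, pvB']
  | cons m rest ih =>
    by_cases h : pvContentLen m + pvSumC rest > C
    · have hr : (m :: rest).reverse = rest.reverse ++ [m] := by simp
      rw [hr, pvT_append_last C rest.reverse m 0 (by rw [pvSumC_reverse]; omega), ih]
      simp only [pvB']
      rw [if_pos h]
    · have hle : 0 + pvSumC (m :: rest).reverse ≤ C := by
        rw [pvSumC_reverse]
        simp only [pvSumC, List.map_cons, List.sum_cons] at *
        omega
      rw [pvT_all C _ 0 hle, List.reverse_reverse]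
      simp only [pvB']
      rw [if_neg h]

-- B's foldl builds exactly acc ++ the running partial sums after acc's last element
theorem pvFoldl_prefix (l : List (List (String × String))) (acc : List Int) (t : Int)
    (h : acc.getLast? = some t) :
    l.foldl (fun p m => p ++ [(p.getLast?.getD 0) + pvContentLen m]) acc
      = acc ++ pvScanTail l t := by
  induction l generalizing acc t with
  | nil => simp [pvScanTail]
  | cons m rest ih =>
    simp only [List.foldl_cons, h, Option.getD_some, pvScanTail]
    rw [ih (acc ++ [t + pvContentLen m]) (t + pvContentLen m) (by simp)]
    simp

theorem pvScanTail_last (l : List (List (String × String))) (t : Int) :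
    (t :: pvScanTail l t).getLast? = some (t + pvSumC l) := by
  induction l generalizing t with
  | nil => simp [pvScanTail, pvSumC]
  | cons m rest ih =>
    simp only [pvScanTail, pvSumC, List.map_cons, List.sum_cons]
    rw [List.getLast?_cons_cons, ih]
    congr 1
    simp [pvSumC]
    ring

-- the index scan over the prefix list agrees with the drop-heads characterisation
theorem pvScanB_eq_B' (mh : List (List (String × String))) (C : Int) :
    ∀ (suffix : List (List (String × String))) (i : Nat) (t : Int),
      mh.drop i = suffix →
      pvScanB mh (t + pvSumC suffix - C) (t :: pvScanTail suffix t) i = pvB' C suffix := by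
  intro suffix
  induction suffix with
  | nil =>
    intro i t hd
    simp only [pvSumC, List.map_nil, List.sum_nil, pvScanTail, pvScanB, pvB']
    split_ifs with h
    · exact hd
    · rfl
  | cons m rest ih =>
    intro i t hd
    have hsum : pvSumC (m :: rest) = pvContentLen m + pvSumC rest := by simp [pvSumC]
    simp only [pvScanTail, pvScanB, pvB']
    by_cases h : pvContentLen m + pvSumC rest > C
    · rw [if_neg (by rw [hsum]; omega), if_pos h]
      have hd' : mh.drop (i + 1) = rest := by
        rw [← List.tail_drop, hd]; rfl
      have harg : t + pvSumC (m :: rest) - C = (t + pvContentLen m) + pvSumC rest - C := by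
        rw [hsum]; ring
      rw [harg]
      exact ih (i + 1) (t + pvContentLen m) hd'
    · rw [if_pos (by rw [hsum]; omega), if_neg h, hd]

-- ===== VERDICT (by name: the statement is the Claim_ definition above) =====
theorem truncate_message_history_spec : Claim_equal_truncate_message_history := by
  intro mh C _ _
  unfold Spec_truncate_message_history truncate_message_history truncate_message_history_alt
  rw [pvLoopA_eq, List.nil_append, pvT_reverse_eq_B']
  have hp := pvFoldl_prefix mh [0] 0 (by simp)
  have hlast : (((0 : Int) :: pvScanTail mh 0)).getLast? = some (0 + pvSumC mh) :=
    pvScanTail_last mh 0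
  simp only [hp, List.singleton_append, hlast, Option.getD_some, zero_add]
  simpa using (pvScanB_eq_B' mh C mh 0 0 (by simp)).symm
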